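-- pv_equiv track=rewrite | github.com/aviad-buskila/medical-recordings-to-psychiatric-insights | src/evaluation/word_alignment.py | align_word_lists_with_indices
-- ===== SOURCE A (Python) =====
-- from typing import Literal
--
-- Op = Literal["=", "S", "D", "I"]
--
-- def align_word_lists_with_indices(
--     ref_words: list[str],
--     hyp_words: list[str],
-- ) -> list[tuple[Op, int | None, int | None]]:
--     """Same alignment as ``align_words`` but on pre-split word lists; returns (op, ref_idx, hyp_idx)."""
--     n, m = len(ref_words), len(hyp_words)
--     dp = [[0] * (m + 1) for _ in range(n + 1)]
--     for i in range(1, n + 1):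
--         dp[i][0] = i
--     for j in range(1, m + 1):
--         dp[0][j] = j
--     for i in range(1, n + 1):
--         for j in range(1, m + 1):
--             cost = 0 if ref_words[i - 1] == hyp_words[j - 1] else 1
--             dp[i][j] = min(
--                 dp[i - 1][j] + 1,
--                 dp[i][j - 1] + 1,
--                 dp[i - 1][j - 1] + cost,
--             )
--
--     raw: list[tuple[Op, int | None, int | None]] = []
--     i, j = n, m
--     while i > 0 or j > 0:
--         if i > 0 and j > 0 and ref_words[i - 1] == hyp_words[j - 1] and dp[i][j] == dp[i - 1][j - 1]:
--             raw.append(("=", i - 1, j - 1))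
--             i -= 1
--             j -= 1
--         elif i > 0 and j > 0 and dp[i][j] == dp[i - 1][j - 1] + 1:
--             raw.append(("S", i - 1, j - 1))
--             i -= 1
--             j -= 1
--         elif i > 0 and dp[i][j] == dp[i - 1][j] + 1:
--             raw.append(("D", i - 1, None))
--             i -= 1
--         elif j > 0 and dp[i][j] == dp[i][j - 1] + 1:
--             raw.append(("I", None, j - 1))
--             j -= 1
--         else:
--             break
--     raw.reverse()
--     return raw
-- ===== SOURCE B (Python) =====
-- def align_word_lists_with_indices(ref_words, hyp_words):
--     """Each DP cell carries (cost, chain): chain is a persistent linked list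
--     (entry, parent) of alignment entries, most recent first.  The alignment is
--     read straight off the final cell; there is no cost matrix and no traceback
--     phase.  Only two rolling rows of cells are kept."""
--     n, m = len(ref_words), len(hyp_words)
--     prev = [(0, None)]
--     for j in range(m):
--         c, ch = prev[j]
--         prev.append((c + 1, (("I", None, j), ch)))
--     for i in range(n):
--         c0, ch0 = prev[0]
--         cur = [(c0 + 1, (("D", i, None), ch0))]
--         rw = ref_words[i]
--         for j in range(m):
--             dc, dch = prev[j]
--             uc, uch = prev[j + 1]
--             lc, lch = cur[j]
--             eq = rw == hyp_words[j]
--             best = min(uc + 1, min(lc + 1, dc + (0 if eq else 1)))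
--             if eq and best == dc:
--                 cell = (best, (("=", i, j), dch))
--             elif best == dc + 1:
--                 cell = (best, (("S", i, j), dch))
--             elif best == uc + 1:
--                 cell = (best, (("D", i, None), uch))
--             else:
--                 cell = (best, (("I", None, j), lch))
--             cur.append(cell)
--         prev = cur
--     out = []
--     chain = prev[-1][1]
--     while chain is not None:
--         entry, chain = chain
--         out.append(entry)
--     out.reverse()
--     return out
-- ===== Notes on version B (the rewrite author's own statement) =====
-- stated objective: alternative
-- what changed: B's DP cells carry (cost, persistent alignment chain) pairs over two rolling rows, so the alignment is read directly off the final cell; A's full cost matrix and its value-recomputing traceback phase are eliminated.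
import Mathlib
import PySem

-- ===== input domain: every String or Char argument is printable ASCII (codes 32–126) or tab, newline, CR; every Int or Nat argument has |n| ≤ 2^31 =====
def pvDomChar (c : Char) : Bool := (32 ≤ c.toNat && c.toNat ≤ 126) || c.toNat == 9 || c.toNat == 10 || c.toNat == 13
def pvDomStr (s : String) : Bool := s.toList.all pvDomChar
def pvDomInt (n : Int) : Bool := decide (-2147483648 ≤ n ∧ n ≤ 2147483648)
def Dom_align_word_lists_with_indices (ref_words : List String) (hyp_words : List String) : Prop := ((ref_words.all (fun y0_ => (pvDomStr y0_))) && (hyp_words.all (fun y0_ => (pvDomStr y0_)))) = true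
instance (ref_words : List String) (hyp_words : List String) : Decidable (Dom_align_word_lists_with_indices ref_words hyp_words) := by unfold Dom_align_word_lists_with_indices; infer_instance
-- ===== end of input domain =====

-- B's DP cells carry (cost, persistent alignment chain) pairs over rolling rows, so the
-- alignment is read off the final cell directly: no cost matrix, no traceback phase.

-- ===== PORT A =====
-- Python's dp list-of-lists is modelled as the journal of its writes (an association list,
-- most recent write first; a cell never written reads 0, its initial value). List indexing
-- ref_words[i-1] is List.getD (i-1), exact here: every read is at a nonnegative in-range index.
def pvCost (ref hyp : List String) (i j : Nat) : Nat :=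
  if ref.getD (i - 1) "" = hyp.getD (j - 1) "" then 0 else 1

def pvLook : List ((Nat × Nat) × Nat) → Nat → Nat → Nat
  | [], _, _ => 0
  | e :: t, a, b => if a = e.1.1 ∧ b = e.1.2 then e.2 else pvLook t a b

-- for i in range(1, n+1): dp[i][0] = i
def pvBndI (t : List ((Nat × Nat) × Nat)) : Nat → List ((Nat × Nat) × Nat)
  | 0 => t
  | i + 1 => ((i + 1, 0), i + 1) :: pvBndI t i

-- for j in range(1, m+1): dp[0][j] = j
def pvBndJ (t : List ((Nat × Nat) × Nat)) : Nat → List ((Nat × Nat) × Nat)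
  | 0 => t
  | j + 1 => ((0, j + 1), j + 1) :: pvBndJ t j

-- inner loop: for j in range(1, k+1) fill dp[i][j]
def pvColA (ref hyp : List String) (t : List ((Nat × Nat) × Nat)) (i : Nat) :
    Nat → List ((Nat × Nat) × Nat)
  | 0 => t
  | k + 1 =>
    let t' := pvColA ref hyp t i k
    ((i, k + 1),
      min (pvLook t' (i - 1) (k + 1) + 1)
        (min (pvLook t' i k + 1) (pvLook t' (i - 1) k + pvCost ref hyp i (k + 1)))) :: t'

-- outer loop: for i in range(1, i0+1)
def pvRowA (ref hyp : List String) (m : Nat) (t : List ((Nat × Nat) × Nat)) :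
    Nat → List ((Nat × Nat) × Nat)
  | 0 => t
  | i + 1 => pvColA ref hyp (pvRowA ref hyp m t i) (i + 1) m

def pvDpA (ref hyp : List String) : List ((Nat × Nat) × Nat) :=
  pvRowA ref hyp hyp.length (pvBndJ (pvBndI [] ref.length) hyp.length) ref.length

-- the while-loop traceback; the final `acc` arms are Python's `break`
def pvTbA (ref hyp : List String) (dp : List ((Nat × Nat) × Nat)) (i j : Nat)
    (acc : List (String × Option Int × Option Int)) : List (String × Option Int × Option Int) :=
  if h0 : 0 < i ∨ 0 < j then
    if h1 : 0 < i ∧ 0 < j ∧ ref.getD (i - 1) "" = hyp.getD (j - 1) "" ∧ pvLook dp i j = pvLook dp (i - 1) (j - 1) then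
      pvTbA ref hyp dp (i - 1) (j - 1) (acc ++ [("=", some ((i : Int) - 1), some ((j : Int) - 1))])
    else if h2 : 0 < i ∧ 0 < j ∧ pvLook dp i j = pvLook dp (i - 1) (j - 1) + 1 then
      pvTbA ref hyp dp (i - 1) (j - 1) (acc ++ [("S", some ((i : Int) - 1), some ((j : Int) - 1))])
    else if h3 : 0 < i ∧ pvLook dp i j = pvLook dp (i - 1) j + 1 then
      pvTbA ref hyp dp (i - 1) j (acc ++ [("D", some ((i : Int) - 1), none)])
    else if h4 : 0 < j ∧ pvLook dp i j = pvLook dp i (j - 1) + 1 then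
      pvTbA ref hyp dp i (j - 1) (acc ++ [("I", none, some ((j : Int) - 1))])
    else acc
  else acc
termination_by i + j
decreasing_by
  · obtain ⟨hi, hj, -⟩ := h1; omega
  · obtain ⟨hi, hj, -⟩ := h2; omega
  · obtain ⟨hi, -⟩ := h3; omega
  · obtain ⟨hj, -⟩ := h4; omega

def align_word_lists_with_indices (ref_words : List String) (hyp_words : List String) :
    List (String × Option Int × Option Int) :=
  (pvTbA ref_words hyp_words (pvDpA ref_words hyp_words) ref_words.length hyp_words.length []).reverse

-- ===== PORT B =====
-- Source B's rows are Python lists of cells (cost, chain); the chain — a persistent linked list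
-- (entry, parent) — is a Lean List with the most recent entry at the head.

-- row 0: prev = [(0, None)]; for j in range(m): append (prev[j][0]+1, (I-entry, prev[j][1]))
def pvRow0C : Nat → List (Nat × List (String × Option Int × Option Int))
  | 0 => [(0, [])]
  | j + 1 =>
    let t := pvRow0C j
    let p := t.getD j (0, [])
    t ++ [(p.1 + 1, ("I", none, some (j : Int)) :: p.2)]

-- inner loop: for j in range(k): read prev[j], prev[j+1], cur[j], choose the cell, append
def pvColC (ref hyp : List String) (prev : List (Nat × List (String × Option Int × Option Int)))
    (i : Nat) (cur0 : List (Nat × List (String × Option Int × Option Int))) :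
    Nat → List (Nat × List (String × Option Int × Option Int))
  | 0 => cur0
  | k + 1 =>
    let c := pvColC ref hyp prev i cur0 k
    let d := prev.getD k (0, [])
    let u := prev.getD (k + 1) (0, [])
    let l := c.getD k (0, [])
    let eq := ref.getD i "" = hyp.getD k ""
    let best := min (u.1 + 1) (min (l.1 + 1) (d.1 + if eq then 0 else 1))
    let cell :=
      if eq ∧ best = d.1 then (best, ("=", some (i : Int), some (k : Int)) :: d.2)
      else if best = d.1 + 1 then (best, ("S", some (i : Int), some (k : Int)) :: d.2)
      else if best = u.1 + 1 then (best, ("D", some (i : Int), none) :: u.2)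
      else (best, ("I", none, some (k : Int)) :: l.2)
    c ++ [cell]

-- outer loop: for i in range(i0): cur seeded from prev[0], then the inner loop; prev = cur
def pvRowC (ref hyp : List String) : Nat → List (Nat × List (String × Option Int × Option Int))
  | 0 => pvRow0C hyp.length
  | i + 1 =>
    let prev := pvRowC ref hyp i
    let p0 := prev.getD 0 (0, [])
    pvColC ref hyp prev i [(p0.1 + 1, ("D", some (i : Int), none) :: p0.2)] hyp.length

-- while chain is not None: pop the head into out
def pvUnroll (acc : List (String × Option Int × Option Int)) :
    List (String × Option Int × Option Int) → List (String × Option Int × Option Int)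
  | [] => acc
  | e :: t => pvUnroll (acc ++ [e]) t

def align_word_lists_with_indices_alt (ref_words : List String) (hyp_words : List String) :
    List (String × Option Int × Option Int) :=
  (pvUnroll [] ((pvRowC ref_words hyp_words ref_words.length).getLastD (0, [])).2).reverse

-- ===== PRECONDITION & SPEC =====
def Spec_align_word_lists_with_indices (ref_words : List String) (hyp_words : List String) (out : List (String × Option Int × Option Int)) : Prop := out = align_word_lists_with_indices_alt ref_words hyp_words
instance (ref_words : List String) (hyp_words : List String) (out : List (String × Option Int × Option Int)) : Decidable (Spec_align_word_lists_with_indices ref_words hyp_words out) := by unfold Spec_align_word_lists_with_indices; infer_instance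

-- ===== CLAIM (what is proved, stated in full; the proofs are below) =====
def Claim_equal_align_word_lists_with_indices : Prop := ∀ (ref_words : List String) (hyp_words : List String), Dom_align_word_lists_with_indices ref_words hyp_words → Spec_align_word_lists_with_indices ref_words hyp_words (align_word_lists_with_indices ref_words hyp_words)

-- ===== LEMMAS AND PROOFS =====

-- the Levenshtein recurrence both fills compute
def pvD (ref hyp : List String) (i j : Nat) : Nat :=
  match i, j with
  | 0, j => j
  | i + 1, 0 => i + 1
  | i + 1, j + 1 =>
    min (pvD ref hyp i (j + 1) + 1)
      (min (pvD ref hyp (i + 1) j + 1) (pvD ref hyp i j + pvCost ref hyp (i + 1) (j + 1)))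
termination_by (i, j)

-- the alignment chain A's traceback emits from (i,j), with A's branch priority
def pvC (ref hyp : List String) (i j : Nat) : List (String × Option Int × Option Int) :=
  match i, j with
  | 0, 0 => []
  | 0, j + 1 => ("I", none, some (j : Int)) :: pvC ref hyp 0 j
  | i + 1, 0 => ("D", some (i : Int), none) :: pvC ref hyp i 0
  | i + 1, j + 1 =>
    if ref.getD i "" = hyp.getD j "" ∧ pvD ref hyp (i + 1) (j + 1) = pvD ref hyp i j then
      ("=", some (i : Int), some (j : Int)) :: pvC ref hyp i j
    else if pvD ref hyp (i + 1) (j + 1) = pvD ref hyp i j + 1 then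
      ("S", some (i : Int), some (j : Int)) :: pvC ref hyp i j
    else if pvD ref hyp (i + 1) (j + 1) = pvD ref hyp i (j + 1) + 1 then
      ("D", some (i : Int), none) :: pvC ref hyp i (j + 1)
    else ("I", none, some (j : Int)) :: pvC ref hyp (i + 1) j
termination_by (i, j)

theorem pvD_zl (r h : List String) (j : Nat) : pvD r h 0 j = j := by
  rw [pvD]

theorem pvD_zr (r h : List String) (i : Nat) : pvD r h (i + 1) 0 = i + 1 := by
  rw [pvD]

theorem pvD_succ (r h : List String) (i j : Nat) :
    pvD r h (i + 1) (j + 1) =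
      min (pvD r h i (j + 1) + 1)
        (min (pvD r h (i + 1) j + 1) (pvD r h i j + pvCost r h (i + 1) (j + 1))) := by
  rw [pvD]

theorem pvD_col0 (r h : List String) (i : Nat) : pvD r h i 0 = i := by
  cases i with
  | zero => exact pvD_zl r h 0
  | succ i => exact pvD_zr r h i

-- ---- A's fill computes pvD ----
theorem pvBndI_out (t : List ((Nat × Nat) × Nat)) (i0 a b : Nat) (h : b ≠ 0 ∨ a = 0 ∨ i0 < a) :
    pvLook (pvBndI t i0) a b = pvLook t a b := by
  induction i0 with
  | zero => rfl
  | succ k ih =>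
    simp only [pvBndI, pvLook]
    rw [if_neg (by omega)]
    exact ih (by omega)

theorem pvBndI_val (t : List ((Nat × Nat) × Nat)) (i0 a : Nat) (h1 : 1 ≤ a) (h2 : a ≤ i0) :
    pvLook (pvBndI t i0) a 0 = a := by
  induction i0 with
  | zero => omega
  | succ k ih =>
    simp only [pvBndI, pvLook]
    by_cases hc : a = k + 1
    · rw [if_pos (by simp [hc])]; omega
    · rw [if_neg (by omega)]; exact ih (by omega)

theorem pvBndJ_out (t : List ((Nat × Nat) × Nat)) (j0 a b : Nat) (h : a ≠ 0 ∨ b = 0 ∨ j0 < b) :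
    pvLook (pvBndJ t j0) a b = pvLook t a b := by
  induction j0 with
  | zero => rfl
  | succ k ih =>
    simp only [pvBndJ, pvLook]
    rw [if_neg (by omega)]
    exact ih (by omega)

theorem pvBndJ_val (t : List ((Nat × Nat) × Nat)) (j0 b : Nat) (h1 : 1 ≤ b) (h2 : b ≤ j0) :
    pvLook (pvBndJ t j0) 0 b = b := by
  induction j0 with
  | zero => omega
  | succ k ih =>
    simp only [pvBndJ, pvLook]
    by_cases hc : b = k + 1
    · rw [if_pos (by simp [hc])]; omega
    · rw [if_neg (by omega)]; exact ih (by omega)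

theorem pvT0_col0 (r h : List String) (a : Nat) (ha : a ≤ r.length) :
    pvLook (pvBndJ (pvBndI [] r.length) h.length) a 0 = a := by
  rw [pvBndJ_out _ _ _ _ (Or.inr (Or.inl rfl))]
  cases Nat.eq_zero_or_pos a with
  | inl h0 => subst h0; rw [pvBndI_out _ _ _ _ (by omega)]; rfl
  | inr h1 => exact pvBndI_val _ _ _ h1 ha

theorem pvT0_row0 (r h : List String) (b : Nat) (hb : b ≤ h.length) :
    pvLook (pvBndJ (pvBndI [] r.length) h.length) 0 b = b := by
  cases Nat.eq_zero_or_pos b with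
  | inl h0 =>
    subst h0
    rw [pvBndJ_out _ _ _ _ (by omega), pvBndI_out _ _ _ _ (by omega)]
    rfl
  | inr h1 => exact pvBndJ_val _ _ _ h1 hb

theorem pvColA_out (r h : List String) (t : List ((Nat × Nat) × Nat)) (i k a b : Nat)
    (hc : a ≠ i ∨ b = 0 ∨ k < b) : pvLook (pvColA r h t i k) a b = pvLook t a b := by
  induction k with
  | zero => rfl
  | succ k ih =>
    simp only [pvColA, pvLook]
    rw [if_neg (by omega)]
    exact ih (by omega)

theorem pvColA_val (r h : List String) (t : List ((Nat × Nat) × Nat)) (i : Nat) (hi : 1 ≤ i)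
    (hprev : ∀ b, b ≤ h.length → pvLook t (i - 1) b = pvD r h (i - 1) b)
    (h0 : pvLook t i 0 = i) :
    ∀ k, k ≤ h.length → ∀ b, 1 ≤ b → b ≤ k → pvLook (pvColA r h t i k) i b = pvD r h i b := by
  intro k
  induction k with
  | zero => omega
  | succ k ih =>
    intro hk b hb1 hb2
    by_cases hbk : b ≤ k
    · simp only [pvColA, pvLook]
      rw [if_neg (by omega)]
      exact ih (by omega) b hb1 hbk
    · have hb : b = k + 1 := by omega
      subst hb
      simp only [pvColA, pvLook]
      rw [if_pos (by simp)]
      have hup : pvLook (pvColA r h t i k) (i - 1) (k + 1) = pvD r h (i - 1) (k + 1) := by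
        rw [pvColA_out r h t i k _ _ (by omega)]; exact hprev _ (by omega)
      have hdiag : pvLook (pvColA r h t i k) (i - 1) k = pvD r h (i - 1) k := by
        rw [pvColA_out r h t i k _ _ (by omega)]; exact hprev _ (by omega)
      have hleft : pvLook (pvColA r h t i k) i k = pvD r h i k := by
        cases Nat.eq_zero_or_pos k with
        | inl hz =>
          subst hz
          rw [pvColA_out r h t i 0 _ _ (by omega), h0, pvD_col0]
        | inr hp => exact ih (by omega) k hp (le_refl k)
      obtain ⟨i', rfl⟩ : ∃ i', i = i' + 1 := ⟨i - 1, by omega⟩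
      rw [hup, hdiag, hleft, pvD_succ]
      simp

theorem pvRowA_out (r h : List String) (m : Nat) (t : List ((Nat × Nat) × Nat)) (i0 a b : Nat)
    (hc : i0 < a ∨ b = 0) : pvLook (pvRowA r h m t i0) a b = pvLook t a b := by
  induction i0 with
  | zero => rfl
  | succ k ih =>
    simp only [pvRowA]
    rw [pvColA_out r h _ _ _ _ _ (by omega)]
    exact ih (by omega)

theorem pvRowA_val (r h : List String) (i0 : Nat) (hi0 : i0 ≤ r.length) :
    ∀ a b, a ≤ i0 → b ≤ h.length →
      pvLook (pvRowA r h h.length (pvBndJ (pvBndI [] r.length) h.length) i0) a b = pvD r h a b := by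
  induction i0 with
  | zero =>
    intro a b ha hb
    have ha0 : a = 0 := by omega
    subst ha0
    simp only [pvRowA]
    rw [pvT0_row0 r h b hb, pvD_zl]
  | succ k ih =>
    intro a b ha hb
    by_cases hak : a ≤ k
    · simp only [pvRowA]
      rw [pvColA_out r h _ _ _ _ _ (by omega)]
      exact ih (by omega) a b hak hb
    · have ha1 : a = k + 1 := by omega
      subst ha1
      cases Nat.eq_zero_or_pos b with
      | inl hb0 =>
        subst hb0
        simp only [pvRowA]
        rw [pvColA_out r h _ _ _ _ _ (by omega),
            pvRowA_out r h _ _ _ _ _ (by omega), pvT0_col0 r h _ hi0, pvD_col0]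
      | inr hb1 =>
        simp only [pvRowA]
        refine pvColA_val r h _ (k + 1) (by omega) ?_ ?_ h.length (le_refl _) b hb1 hb
        · intro b' hb'
          simpa using ih (by omega) k b' (le_refl k) hb'
        · rw [pvRowA_out r h _ _ _ _ _ (by omega), pvT0_col0 r h _ hi0]

theorem pvDpA_eq (r h : List String) (a b : Nat) (ha : a ≤ r.length) (hb : b ≤ h.length) :
    pvLook (pvDpA r h) a b = pvD r h a b := by
  exact pvRowA_val r h r.length (le_refl _) a b ha hb

-- pvD (i+1) (j+1) always equals one of its three branch values
theorem pvD_attains (r h : List String) (i j : Nat) :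
    pvD r h (i + 1) (j + 1) = pvD r h i (j + 1) + 1 ∨
    pvD r h (i + 1) (j + 1) = pvD r h (i + 1) j + 1 ∨
    pvD r h (i + 1) (j + 1) = pvD r h i j + pvCost r h (i + 1) (j + 1) := by
  rw [pvD_succ]; omega

-- ---- snoc lookups ----
theorem pvGetD_snoc_lt {α : Type} (t : List α) (x d : α) (b : Nat) (hb : b < t.length) :
    (t ++ [x]).getD b d = t.getD b d := by
  simp [List.getD, List.getElem?_append_left hb]

theorem pvGetD_snoc_self {α : Type} (t : List α) (x d : α) :
    (t ++ [x]).getD t.length d = x := by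
  simp [List.getD]

-- ---- B's fill computes (pvD, pvC) ----
theorem pvRow0C_len (j0 : Nat) : (pvRow0C j0).length = j0 + 1 := by
  induction j0 with
  | zero => rfl
  | succ k ih => simp only [pvRow0C, List.length_append, List.length_cons, List.length_nil]; omega

theorem pvRow0C_val (r h : List String) (j0 : Nat) :
    ∀ b, b ≤ j0 → (pvRow0C j0).getD b (0, []) = (pvD r h 0 b, pvC r h 0 b) := by
  induction j0 with
  | zero =>
    intro b hb
    have : b = 0 := by omega
    subst this
    rw [pvD_zl, pvC]
    rfl
  | succ k ih =>
    intro b hb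
    by_cases hbk : b ≤ k
    · simp only [pvRow0C]
      rw [pvGetD_snoc_lt _ _ _ _ (by rw [pvRow0C_len]; omega)]
      exact ih b hbk
    · have hb1 : b = k + 1 := by omega
      subst hb1
      simp only [pvRow0C]
      have hl : (pvRow0C k).length = k + 1 := pvRow0C_len k
      rw [← hl, pvGetD_snoc_self, hl]
      rw [ih k (le_refl k)]
      rw [pvD_zl, pvD_zl]
      conv_rhs => rw [pvC]

theorem pvColC_len (r h : List String) (prev : List (Nat × List (String × Option Int × Option Int)))
    (i : Nat) (cur0 : List (Nat × List (String × Option Int × Option Int))) (k : Nat) :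
    (pvColC r h prev i cur0 k).length = cur0.length + k := by
  induction k with
  | zero => rfl
  | succ k ih => simp only [pvColC, List.length_append, List.length_cons, List.length_nil]; omega

theorem pvColC_val (r h : List String) (prev : List (Nat × List (String × Option Int × Option Int)))
    (i : Nat)
    (hprev : ∀ b, b ≤ h.length → prev.getD b (0, []) = (pvD r h i b, pvC r h i b)) :
    ∀ k, k ≤ h.length → ∀ b, b ≤ k →
      (pvColC r h prev i [(pvD r h (i + 1) 0, pvC r h (i + 1) 0)] k).getD b (0, []) =
        (pvD r h (i + 1) b, pvC r h (i + 1) b) := by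
  intro k
  induction k with
  | zero =>
    intro hk b hb
    have : b = 0 := by omega
    subst this
    rfl
  | succ k ih =>
    intro hk b hb
    by_cases hbk : b ≤ k
    · simp only [pvColC]
      rw [pvGetD_snoc_lt _ _ _ _ (by rw [pvColC_len]; simp; omega)]
      exact ih (by omega) b hbk
    · have hb1 : b = k + 1 := by omega
      subst hb1
      simp only [pvColC]
      have hl : (pvColC r h prev i [(pvD r h (i + 1) 0, pvC r h (i + 1) 0)] k).length = k + 1 := by
        rw [pvColC_len]; simp; omega
      rw [← hl, pvGetD_snoc_self, hl]
      rw [hprev k (by omega), hprev (k + 1) (by omega), ih (by omega) k (le_refl k)]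
      have hcost : (if r.getD i "" = h.getD k "" then 0 else 1) = pvCost r h (i + 1) (k + 1) := by
        unfold pvCost
        simp only [Nat.add_sub_cancel]
      have hbest :
          min (pvD r h i (k + 1) + 1)
            (min (pvD r h (i + 1) k + 1)
              (pvD r h i k + if r.getD i "" = h.getD k "" then 0 else 1)) =
            pvD r h (i + 1) (k + 1) := by
        rw [hcost, ← pvD_succ]
      simp only
      rw [hbest]
      conv_rhs => rw [pvC]
      by_cases hC1 : r.getD i "" = h.getD k "" ∧ pvD r h (i + 1) (k + 1) = pvD r h i k
      · rw [if_pos hC1, if_pos hC1]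
      · rw [if_neg hC1, if_neg hC1]
        by_cases hC2 : pvD r h (i + 1) (k + 1) = pvD r h i k + 1
        · rw [if_pos hC2, if_pos hC2]
        · rw [if_neg hC2, if_neg hC2]
          by_cases hC3 : pvD r h (i + 1) (k + 1) = pvD r h i (k + 1) + 1
          · rw [if_pos hC3, if_pos hC3]
          · rw [if_neg hC3, if_neg hC3]

theorem pvRowC_val (r h : List String) (i0 : Nat) :
    ∀ b, b ≤ h.length → (pvRowC r h i0).getD b (0, []) = (pvD r h i0 b, pvC r h i0 b) := by
  induction i0 with
  | zero => exact fun b hb => pvRow0C_val r h h.length b hb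
  | succ i ih =>
    intro b hb
    simp only [pvRowC]
    have hp0 : (pvRowC r h i).getD 0 (0, []) = (pvD r h i 0, pvC r h i 0) := ih 0 (by omega)
    have hseed : ((pvRowC r h i).getD 0 (0, [])).1 + 1 = pvD r h (i + 1) 0 := by
      rw [hp0, pvD_col0, pvD_col0]
    have hseed2 : (("D", some (i : Int), none) :: ((pvRowC r h i).getD 0 (0, [])).2 :
        List (String × Option Int × Option Int)) = pvC r h (i + 1) 0 := by
      rw [hp0]
      conv_rhs => rw [pvC]
    have : [(((pvRowC r h i).getD 0 (0, [])).1 + 1,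
        ("D", some (i : Int), none) :: ((pvRowC r h i).getD 0 (0, [])).2)] =
        [(pvD r h (i + 1) 0, pvC r h (i + 1) 0)] := by
      rw [hseed, hseed2]
    rw [this]
    exact pvColC_val r h (pvRowC r h i) i ih h.length (le_refl _) b hb

theorem pvRowC_len (r h : List String) (i0 : Nat) :
    (pvRowC r h i0).length = h.length + 1 := by
  cases i0 with
  | zero => exact pvRow0C_len h.length
  | succ i =>
    simp only [pvRowC]
    rw [pvColC_len]
    simp [Nat.add_comm]

theorem pvUnroll_eq (l acc : List (String × Option Int × Option Int)) :
    pvUnroll acc l = acc ++ l := by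
  induction l generalizing acc with
  | nil => simp [pvUnroll]
  | cons e t ih => simp [pvUnroll, ih]

-- ---- A's traceback emits pvC ----
theorem pvTb_chain (r h : List String) :
    ∀ N i j, i + j ≤ N → i ≤ r.length → j ≤ h.length →
      ∀ acc, pvTbA r h (pvDpA r h) i j acc = acc ++ pvC r h i j := by
  intro N
  induction N with
  | zero =>
    intro i j hN hi hj acc
    have hi0 : i = 0 := by omega
    have hj0 : j = 0 := by omega
    subst hi0; subst hj0
    rw [pvTbA, pvC]
    simp
  | succ N ihN =>
    intro i j hN hi hj acc
    have hdp : ∀ a b, a ≤ r.length → b ≤ h.length → pvLook (pvDpA r h) a b = pvD r h a b :=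
      fun a b ha hb => pvDpA_eq r h a b ha hb
    rcases Nat.eq_zero_or_pos i with hi0 | hipos
    · rcases Nat.eq_zero_or_pos j with hj0 | hjpos
      · subst hi0; subst hj0
        rw [pvTbA, pvC]; simp
      · -- i = 0, j > 0 : insertion
        subst hi0
        obtain ⟨j', rfl⟩ : ∃ j', j = j' + 1 := ⟨j - 1, by omega⟩
        rw [pvTbA]
        rw [dif_pos (by omega)]
        rw [dif_neg (by omega), dif_neg (by omega), dif_neg (by omega)]
        rw [dif_pos ⟨by omega, by
          rw [hdp 0 (j' + 1) (by omega) hj, hdp 0 ((j' + 1) - 1) (by omega) (by omega), pvD_zl, pvD_zl]; omega⟩]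
        rw [ihN 0 ((j' + 1) - 1) (by omega) (by omega) (by omega)]
        conv_rhs => rw [pvC]
        simp
    · rcases Nat.eq_zero_or_pos j with hj0 | hjpos
      · -- j = 0, i > 0 : deletion
        subst hj0
        obtain ⟨i', rfl⟩ : ∃ i', i = i' + 1 := ⟨i - 1, by omega⟩
        rw [pvTbA]
        rw [dif_pos (by omega)]
        rw [dif_neg (by omega), dif_neg (by omega)]
        rw [dif_pos ⟨by omega, by
          rw [hdp (i' + 1) 0 hi (by omega), hdp ((i' + 1) - 1) 0 (by omega) (by omega),
            pvD_col0, pvD_col0]; omega⟩]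
        rw [ihN ((i' + 1) - 1) 0 (by omega) (by omega) (by omega)]
        conv_rhs => rw [pvC]
        simp
      · -- i > 0, j > 0
        obtain ⟨i', rfl⟩ : ∃ i', i = i' + 1 := ⟨i - 1, by omega⟩
        obtain ⟨j', rfl⟩ : ∃ j', j = j' + 1 := ⟨j - 1, by omega⟩
        have hdp00 := hdp (i' + 1) (j' + 1) hi hj
        have hdpu := hdp i' (j' + 1) (by omega) hj
        have hdpl := hdp (i' + 1) j' hi (by omega)
        have hdpd := hdp i' j' (by omega) (by omega)
        have hsimp : ((i' + 1 : Nat) - 1) = i' := by omega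
        have hsj : ((j' + 1 : Nat) - 1) = j' := by omega
        by_cases hC1 : r.getD i' "" = h.getD j' "" ∧ pvD r h (i' + 1) (j' + 1) = pvD r h i' j'
        · rw [pvTbA]
          rw [dif_pos (by omega)]
          rw [dif_pos ⟨by omega, by omega, by simpa [hsimp, hsj] using hC1.1, by
            rw [hdp00]; simpa [hsimp, hsj, hdpd] using hC1.2⟩]
          rw [ihN ((i' + 1) - 1) ((j' + 1) - 1) (by omega) (by omega) (by omega)]
          conv_rhs => rw [pvC]
          rw [if_pos hC1]
          simp [hsimp, hsj]
        · by_cases hC2 : pvD r h (i' + 1) (j' + 1) = pvD r h i' j' + 1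
          · rw [pvTbA]
            rw [dif_pos (by omega)]
            rw [dif_neg (by
              simp only [hsimp, hsj, hdp00, hdpd]
              intro hcon
              exact hC1 ⟨hcon.2.2.1, hcon.2.2.2⟩)]
            rw [dif_pos ⟨by omega, by omega, by simp only [hsimp, hsj, hdp00, hdpd]; exact hC2⟩]
            rw [ihN ((i' + 1) - 1) ((j' + 1) - 1) (by omega) (by omega) (by omega)]
            conv_rhs => rw [pvC]
            rw [if_neg hC1, if_pos hC2]
            simp [hsimp, hsj]
          · by_cases hC3 : pvD r h (i' + 1) (j' + 1) = pvD r h i' (j' + 1) + 1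
            · rw [pvTbA]
              rw [dif_pos (by omega)]
              rw [dif_neg (by
                simp only [hsimp, hsj, hdp00, hdpd]
                intro hcon
                exact hC1 ⟨hcon.2.2.1, hcon.2.2.2⟩)]
              rw [dif_neg (by
                simp only [hsimp, hsj, hdp00, hdpd]
                intro hcon
                exact hC2 hcon.2.2)]
              rw [dif_pos ⟨by omega, by simp only [hsimp, hdp00, hdpu]; exact hC3⟩]
              rw [ihN ((i' + 1) - 1) (j' + 1) (by omega) (by omega) (by omega)]
              conv_rhs => rw [pvC]
              rw [if_neg hC1, if_neg hC2, if_pos hC3]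
              simp [hsimp]
            · have hC4 : pvD r h (i' + 1) (j' + 1) = pvD r h (i' + 1) j' + 1 := by
                rcases pvD_attains r h i' j' with hx | hx | hx
                · exact absurd hx hC3
                · exact hx
                · by_cases heq : r.getD i' "" = h.getD j' ""
                  · exfalso
                    apply hC1
                    refine ⟨heq, ?_⟩
                    rw [hx]
                    have hc0 : pvCost r h (i' + 1) (j' + 1) = 0 := by
                      unfold pvCost
                      simp only [Nat.add_sub_cancel]
                      rw [if_pos heq]
                    omega
                  · exfalso
                    apply hC2
                    rw [hx]
                    have hc1 : pvCost r h (i' + 1) (j' + 1) = 1 := by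
                      unfold pvCost
                      simp only [Nat.add_sub_cancel]
                      rw [if_neg heq]
                    omega
              rw [pvTbA]
              rw [dif_pos (by omega)]
              rw [dif_neg (by
                simp only [hsimp, hsj, hdp00, hdpd]
                intro hcon
                exact hC1 ⟨hcon.2.2.1, hcon.2.2.2⟩)]
              rw [dif_neg (by
                simp only [hsimp, hsj, hdp00, hdpd]
                intro hcon
                exact hC2 hcon.2.2)]
              rw [dif_neg (by
                simp only [hsimp, hdp00, hdpu]
                intro hcon
                exact hC3 hcon.2)]
              rw [dif_pos ⟨by omega, by simp only [hsj, hdp00, hdpl]; exact hC4⟩]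
              rw [ihN (i' + 1) ((j' + 1) - 1) (by omega) (by omega) (by omega)]
              conv_rhs => rw [pvC]
              rw [if_neg hC1, if_neg hC2, if_neg hC3]
              simp [hsj]

-- B's final cell (prev[-1]) holds pvC n m
theorem pvRowC_last (r h : List String) :
    (pvRowC r h r.length).getLastD (0, []) = (pvD r h r.length h.length, pvC r h r.length h.length) := by
  have hlen : (pvRowC r h r.length).length = h.length + 1 := pvRowC_len r h r.length
  have h1 : (pvRowC r h r.length).getLastD (0, []) =
      (pvRowC r h r.length).getD ((pvRowC r h r.length).length - 1) (0, []) := by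
    rw [List.getLastD_eq_getLast?, List.getLast?_eq_getElem?]
    rfl
  rw [h1, hlen]
  simpa using pvRowC_val r h r.length h.length (le_refl _)

-- ===== VERDICT (by name: the statement is the Claim_ definition above) =====
theorem align_word_lists_with_indices_spec : Claim_equal_align_word_lists_with_indices := by
  intro ref hyp _
  unfold Spec_align_word_lists_with_indices
  unfold align_word_lists_with_indices align_word_lists_with_indices_alt
  rw [pvTb_chain ref hyp (ref.length + hyp.length) ref.length hyp.length (le_refl _)
    (le_refl _) (le_refl _) [], pvRowC_last, pvUnroll_eq]
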